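-- pv_equiv track=rewrite | github.com/palinaskakun/Pokedex | proj09.py | find_pokemon
-- ===== SOURCE A (Python) =====
-- def find_pokemon(pokedex, names):
--     """
--     Takes in the master dictionary and a set of names of the pokemon It
--     searches the dict for those pokemon and returns a corresponding dictionary
--     of information for each of those pokemon, with each key being a pokemon’s
--     name and each value being their list of corresponding information
--     associated with said pokemon
--     pokedex: Master dictionary that is being processed (dict)
--     names: Pokemon names to search for(set)
--     Returns: dictionary (dict)
--     """
--
--     dictionary={}
--     #goes through names in a set
--     for name in names:
--         #iterating over nested dict pokedex starting with generation keys
--         for gen in pokedex: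
--             #iterating over type keys
--             for types in pokedex[gen]:
--                 #iterating over pokemon name keys
--                 for pok_name in pokedex[gen][types]:
--                     #if name from the given set is in the pokedex name keys
--                     if name in pokedex[gen][types]:
--                         #building a list of pokemon values
--                         stats=pokedex[gen][types][name]
--                         stats=stats[1:]+[gen,types]
--
--                         dictionary[name]=stats
--
--     return dictionary
-- ===== SOURCE B (Python) =====
-- def find_pokemon(pokedex, names):
--     # Flatten the nested pokedex into one list of (name, info) pairs, build
--     # the name->info index with dict() (later pairs win, like repeated
--     # assignment), then answer all queried names with one filtered lookup pass.
--     index = dict(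
--         (pok_name, info[1:] + [gen, types])
--         for gen, type_map in pokedex.items()
--         for types, mons in type_map.items()
--         for pok_name, info in mons.items()
--     )
--     return {name: index[name] for name in names if name in index}
-- ===== Notes on version B (the rewrite author's own statement) =====
-- stated objective: faster
-- what changed: A rescans the whole nested pokedex (with a redundant extra inner loop over pokemon keys) once per queried name; B flattens the pokedex once into a list of (name, info) pairs via .items(), builds a dict index from it, and answers all names with one filtered lookup pass.
import Mathlib
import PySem

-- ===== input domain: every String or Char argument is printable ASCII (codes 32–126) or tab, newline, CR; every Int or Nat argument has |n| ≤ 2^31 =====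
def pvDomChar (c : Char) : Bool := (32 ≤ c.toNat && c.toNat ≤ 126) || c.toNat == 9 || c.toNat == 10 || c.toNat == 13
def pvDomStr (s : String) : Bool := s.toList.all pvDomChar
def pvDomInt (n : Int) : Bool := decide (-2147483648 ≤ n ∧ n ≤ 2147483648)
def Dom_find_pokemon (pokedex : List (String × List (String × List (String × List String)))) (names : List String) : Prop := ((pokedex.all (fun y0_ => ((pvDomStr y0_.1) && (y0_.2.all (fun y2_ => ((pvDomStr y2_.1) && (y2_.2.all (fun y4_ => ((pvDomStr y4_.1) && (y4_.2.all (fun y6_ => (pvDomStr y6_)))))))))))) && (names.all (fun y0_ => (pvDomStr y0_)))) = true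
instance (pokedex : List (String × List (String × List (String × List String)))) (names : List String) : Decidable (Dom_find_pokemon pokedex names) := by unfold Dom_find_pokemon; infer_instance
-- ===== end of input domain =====

-- B replaces A's per-name rescans of the nested pokedex by one flattening pass
-- (a flatMap producing (name, info) pairs), a dict built from that flat list,
-- and a single filtered lookup pass over the names (faster).
-- Pre_ excludes association lists with duplicate keys at any dict level, which
-- no Python dict can represent; there A's repeated-lookup traversal is an
-- artefact of the Lean encoding.


-- ===== PORT A =====
def find_pokemon (pokedex : List (String × List (String × List (String × List String)))) (names : List String) : List (String × List String) :=
  (names.foldl (fun dictionary name =>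
    pokedex.foldl (fun d1 p =>
      let gen := p.1
      let tm := (PySem.Dict.mk pokedex).getD gen []
      tm.foldl (fun d2 q =>
        let types := q.1
        let mons := (PySem.Dict.mk tm).getD types []
        mons.foldl (fun d3 _pok_name =>
          if (PySem.Dict.mk mons).contains name then
            d3.insert name (PySem.List.slice ((PySem.Dict.mk mons).getD name []) (some 1) none ++ [gen, types])
          else d3) d2) d1) dictionary) (PySem.Dict.empty : PySem.Dict String (List String))).items

-- ===== PORT B =====
-- B-side helper: the flattened list of (name, info) entries Source B's generator yields
def pvEntries (pokedex : List (String × List (String × List (String × List String)))) : List (String × List String) :=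
  pokedex.flatMap (fun gp =>
    gp.2.flatMap (fun tp =>
      tp.2.map (fun np => (np.1, PySem.List.slice np.2 (some 1) none ++ [gp.1, tp.1]))))

def find_pokemon_alt (pokedex : List (String × List (String × List (String × List String)))) (names : List String) : List (String × List String) :=
  let index := PySem.Dict.ofList (pvEntries pokedex)
  (names.foldl (fun d name =>
    if index.contains name then d.insert name (index.getD name []) else d)
    (PySem.Dict.empty : PySem.Dict String (List String))).items

-- ===== PRECONDITION & SPEC =====
-- Pre_ excludes association lists with duplicate keys at any dict level: such
-- lists encode no Python dict, and A's lookup-by-key traversal on them is an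
-- accident of the encoding.
def Pre_find_pokemon (pokedex : List (String × List (String × List (String × List String)))) (names : List String) : Prop :=
  (pokedex.map Prod.fst).Nodup ∧
  ∀ gp ∈ pokedex, (gp.2.map Prod.fst).Nodup ∧ ∀ tp ∈ gp.2, (tp.2.map Prod.fst).Nodup
instance (pokedex : List (String × List (String × List (String × List String)))) (names : List String) : Decidable (Pre_find_pokemon pokedex names) := by unfold Pre_find_pokemon; infer_instance
def pvWitness_find_pokemon : (List (String × List (String × List (String × List String)))) × List String :=
  ([("1", [("grass", [("bulbasaur", ["1", "seed"])])])], ["bulbasaur", "mew"])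
def Spec_find_pokemon (pokedex : List (String × List (String × List (String × List String)))) (names : List String) (out : List (String × List String)) : Prop := out = find_pokemon_alt pokedex names
instance (pokedex : List (String × List (String × List (String × List String)))) (names : List String) (out : List (String × List String)) : Decidable (Spec_find_pokemon pokedex names out) := by unfold Spec_find_pokemon; infer_instance

-- ===== CLAIM (what is proved, stated in full; the proofs are below) =====
def Claim_equal_find_pokemon : Prop := ∀ (pokedex : List (String × List (String × List (String × List String)))) (names : List String), Dom_find_pokemon pokedex names → Pre_find_pokemon pokedex names → Spec_find_pokemon pokedex names (find_pokemon pokedex names)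

-- ===== LEMMAS AND PROOFS =====

-- the flat list of (name, value) assignment events A's pokedex traversal performs
def pvEvents (pokedex : List (String × List (String × List (String × List String)))) : List (String × List String) :=
  pokedex.flatMap (fun p =>
    let gen := p.1
    let tm := (PySem.Dict.mk pokedex).getD gen []
    tm.flatMap (fun q =>
      let types := q.1
      let mons := (PySem.Dict.mk tm).getD types []
      mons.map (fun r =>
        (r.1, PySem.List.slice ((PySem.Dict.mk mons).getD r.1 []) (some 1) none ++ [gen, types]))))

-- last value assigned to key k by the event list L
def pvLast (L : List (String × List String)) (k : String) : Option (List String) :=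
  L.foldl (fun acc p => if p.1 == k then some p.2 else acc) none

theorem pvLast_acc (L : List (String × List String)) (k : String)
    (acc : Option (List String)) :
    L.foldl (fun acc p => if p.1 == k then some p.2 else acc) acc
      = (pvLast L k).or acc := by
  induction L generalizing acc with
  | nil => simp [pvLast]
  | cons p L ih =>
    simp only [List.foldl_cons]
    rw [ih]
    have hc : pvLast (p :: L) k = (pvLast L k).or (if p.1 == k then some p.2 else none) := by
      simp only [pvLast, List.foldl_cons]
      rw [ih]
      rfl
    rw [hc, Option.or_assoc]
    congr 1
    by_cases h : p.1 == k <;> simp [h]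

theorem get?_foldl_insert (L : List (String × List String))
    (d : PySem.Dict String (List String)) (k : String) :
    (L.foldl (fun d p => d.insert p.1 p.2) d).get? k = (pvLast L k).or (d.get? k) := by
  induction L generalizing d with
  | nil => simp [pvLast]
  | cons p L ih =>
    simp only [List.foldl_cons]
    rw [ih]
    have hl : pvLast (p :: L) k = (pvLast L k).or (if p.1 == k then some p.2 else none) := by
      simp only [pvLast, List.foldl_cons]
      rw [pvLast_acc]
      rfl
    rw [hl, Option.or_assoc]
    congr 1
    by_cases h : p.1 == k
    · have : k = p.1 := by simpa using (BEq.symm h)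
      simp [this, PySem.Dict.get?_insert_self]
    · have hne : k ≠ p.1 := fun he => by subst he; simp at h
      simp [h, PySem.Dict.get?_insert_of_ne _ _ hne]

theorem foldl_ite_insert_const {α : Type} (L : List α) (c : α → Bool)
    (d : PySem.Dict String (List String)) (k : String) (v : List String) :
    L.foldl (fun d x => if c x then d.insert k v else d) d
      = if L.any c then d.insert k v else d := by
  induction L generalizing d with
  | nil => simp
  | cons x L ih =>
    simp only [List.foldl_cons, List.any_cons]
    by_cases h : c x
    · simp [h, ih, PySem.Dict.insert_insert_self]
    · simp [h, ih]

-- A's inner triple loop for one name equals a single conditional insert of the last event value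
theorem condfold_eq_match (L : List (String × List String)) (name : String)
    (d : PySem.Dict String (List String)) :
    L.foldl (fun d p => if p.1 == name then d.insert name p.2 else d) d
      = match pvLast L name with
        | some v => d.insert name v
        | none => d := by
  induction L generalizing d with
  | nil => simp [pvLast]
  | cons p L ih =>
    have hc : pvLast (p :: L) name = (pvLast L name).or (if p.1 == name then some p.2 else none) := by
      simp only [pvLast, List.foldl_cons]
      rw [pvLast_acc]
      rfl
    simp only [List.foldl_cons]
    rw [hc]
    by_cases h : p.1 == name
    · simp only [h, ih]
      cases pvLast L name <;> simp [PySem.Dict.insert_insert_self]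
    · simp only [h]
      rw [if_neg (by simp), ih]
      cases pvLast L name <;> simp

-- one (gen, types) bucket of A's loop equals the conditional fold over its events
theorem group_eq (mons : List (String × List String)) (gen types name : String)
    (d : PySem.Dict String (List String)) :
    mons.foldl (fun d3 _pok_name =>
        if (PySem.Dict.mk mons).contains name then
          d3.insert name (PySem.List.slice ((PySem.Dict.mk mons).getD name []) (some 1) none ++ [gen, types])
        else d3) d
      = (mons.map (fun r =>
          (r.1, PySem.List.slice ((PySem.Dict.mk mons).getD r.1 []) (some 1) none ++ [gen, types]))).foldl
          (fun d p => if p.1 == name then d.insert name p.2 else d) d := by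
  rw [List.foldl_map]
  have hstep : (fun (d : PySem.Dict String (List String)) (r : String × List String) =>
        if r.1 == name then d.insert name (PySem.List.slice ((PySem.Dict.mk mons).getD r.1 []) (some 1) none ++ [gen, types]) else d)
      = (fun d r => if r.1 == name then d.insert name (PySem.List.slice ((PySem.Dict.mk mons).getD name []) (some 1) none ++ [gen, types]) else d) := by
    funext d r
    by_cases h : r.1 == name
    · have : r.1 = name := by simpa using h
      rw [this]
    · simp [h]
  rw [hstep, foldl_ite_insert_const, foldl_ite_insert_const]
  rw [PySem.Dict.contains_mk]
  by_cases h : mons.any (fun r => r.1 == name)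
  · have hne : mons.any (fun _ => true) = true := by
      rcases List.any_eq_true.mp h with ⟨r, hr, _⟩
      exact List.any_eq_true.mpr ⟨r, hr, rfl⟩
    simp only [h, hne]
  · simp only [h]
    simp

theorem step_eq (pokedex : List (String × List (String × List (String × List String))))
    (name : String) (d : PySem.Dict String (List String)) :
    (pokedex.foldl (fun d1 p =>
      let gen := p.1
      let tm := (PySem.Dict.mk pokedex).getD gen []
      tm.foldl (fun d2 q =>
        let types := q.1
        let mons := (PySem.Dict.mk tm).getD types []
        mons.foldl (fun d3 _pok_name =>
          if (PySem.Dict.mk mons).contains name then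
            d3.insert name (PySem.List.slice ((PySem.Dict.mk mons).getD name []) (some 1) none ++ [gen, types])
          else d3) d2) d1) d)
      = match pvLast (pvEvents pokedex) name with
        | some v => d.insert name v
        | none => d := by
  rw [← condfold_eq_match]
  simp only [pvEvents, List.foldl_flatMap]
  congr 1
  funext d1 p
  congr 1
  funext d2 q
  exact group_eq _ _ _ _ _

-- under Pre_ (no duplicate keys at any level) A's event list is exactly B's entry list
theorem events_eq_entries (pokedex : List (String × List (String × List (String × List String))))
    (hpre : Pre_find_pokemon pokedex []) :
    pvEvents pokedex = pvEntries pokedex := by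
  obtain ⟨h1, h2⟩ := hpre
  unfold pvEvents pvEntries
  apply List.flatMap_congr
  intro p hp
  have htm : (PySem.Dict.mk pokedex).getD p.1 [] = p.2 :=
    PySem.Dict.getD_of_mem_items _ (by simpa using hp) (by simpa [PySem.Dict.keys] using h1) []
  simp only [htm]
  obtain ⟨h2a, h2b⟩ := h2 p hp
  apply List.flatMap_congr
  intro q hq
  have hmons : (PySem.Dict.mk p.2).getD q.1 [] = q.2 :=
    PySem.Dict.getD_of_mem_items _ (by simpa using hq) (by simpa [PySem.Dict.keys] using h2a) []
  simp only [hmons]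
  apply List.map_congr_left
  intro r hr
  have hv : (PySem.Dict.mk q.2).getD r.1 [] = r.2 :=
    PySem.Dict.getD_of_mem_items _ (by simpa using hr) (by simpa [PySem.Dict.keys] using (h2b q hq)) []
  simp only [hv]

-- ===== VERDICT (by name: the statement is the Claim_ definition above) =====
theorem find_pokemon_spec : Claim_equal_find_pokemon := by
  intro pokedex names _hdom hpre
  unfold Spec_find_pokemon find_pokemon
  have halt : find_pokemon_alt pokedex names
      = (names.foldl (fun d name =>
          if (PySem.Dict.ofList (pvEntries pokedex)).contains name then
            d.insert name ((PySem.Dict.ofList (pvEntries pokedex)).getD name [])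
          else d) (PySem.Dict.empty : PySem.Dict String (List String))).items := rfl
  rw [halt, ← events_eq_entries pokedex ⟨hpre.1, hpre.2⟩]
  have hix : PySem.Dict.ofList (pvEvents pokedex)
      = (pvEvents pokedex).foldl (fun d p => d.insert p.1 p.2) PySem.Dict.empty := rfl
  rw [hix]
  congr 1
  congr 1
  funext d name
  rw [step_eq]
  rw [PySem.Dict.contains_eq_isSome_get?, PySem.Dict.getD_eq_get?_getD]
  rw [get?_foldl_insert]
  simp only [PySem.Dict.get?_empty, Option.or_none]
  cases pvLast (pvEvents pokedex) name <;> simp
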